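-- pv_equiv track=rewrite | github.com/Akrem07/Python | Proj_4/EX2V2TP4.py | itere
-- ===== SOURCE A (Python) =====
-- def differences(l):
--     M=[]
--     for i in range(len(l)-1):
--         M.append(l[i+1]-l[i])
--     return M
--
-- def itere(l,n):
--     x=[]
--     if n==0 :
--         return l
--     elif n==1:
--         return differences(l)
--     else :
--         for k in range (n-1):
--             x=differences(l)
--             l=x
--         return differences(x)
-- ===== SOURCE B (Python) =====
-- def itere(l, n):
--     # closed form: n-th finite difference via alternating binomial coefficients
--     if n <= 0:
--         return l if n == 0 else []
--     m = len(l) - n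
--     if m <= 0:
--         return []
--     # coef[k] = (-1)**(n-k) * C(n,k), built with the multiplicative recurrence
--     coef = []
--     c = 1
--     for k in range(n + 1):
--         coef.append(c if (n - k) % 2 == 0 else -c)
--         c = c * (n - k) // (k + 1)
--     return [sum(coef[k] * l[i + k] for k in range(n + 1)) for i in range(m)]
-- ===== Notes on version B (the rewrite author's own statement) =====
-- stated objective: alternative
-- what changed: Replaces A's n sequential difference sweeps (each rebuilding the list) by the closed-form n-th finite difference: one pass per output element using precomputed alternating binomial coefficients (-1)^(n-k)*C(n,k).
import Mathlib
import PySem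

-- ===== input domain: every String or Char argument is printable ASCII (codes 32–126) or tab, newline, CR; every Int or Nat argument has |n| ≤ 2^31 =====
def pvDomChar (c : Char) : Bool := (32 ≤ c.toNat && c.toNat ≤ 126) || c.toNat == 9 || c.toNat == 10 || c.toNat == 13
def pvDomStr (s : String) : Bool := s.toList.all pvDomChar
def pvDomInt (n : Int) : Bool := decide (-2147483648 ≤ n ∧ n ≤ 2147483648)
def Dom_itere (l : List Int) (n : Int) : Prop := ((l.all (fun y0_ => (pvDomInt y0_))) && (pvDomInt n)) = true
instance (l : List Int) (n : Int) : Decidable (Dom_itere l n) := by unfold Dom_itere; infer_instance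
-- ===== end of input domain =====

-- B replaces A's n sequential difference sweeps by the alternating-binomial closed form
-- (one pass per output element with precomputed coefficients); objective: alternative algorithm.

-- ===== PORT A =====
def differencesA (l : List Int) : List Int :=
  (PySem.List.pyRange 0 ((l.length : Int) - 1) 1).foldl
    (fun M i => M ++ [PySem.List.pyGetD l (i + 1) 0 - PySem.List.pyGetD l i 0]) []

def itere (l : List Int) (n : Int) : List Int :=
  let x : List Int := []
  if n = 0 then l
  else if n = 1 then differencesA l
  else
    let s := (PySem.List.pyRange 0 (n - 1) 1).foldl
      (fun (s : List Int × List Int) _ =>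
        let x := differencesA s.2
        (x, x)) (x, l)
    differencesA s.1

-- ===== PORT B =====
def itere_alt (l : List Int) (n : Int) : List Int :=
  if n ≤ 0 then (if n = 0 then l else [])
  else
    let m : Int := (l.length : Int) - n
    if m ≤ 0 then []
    else
      let cf := (PySem.List.pyRange 0 (n + 1) 1).foldl
        (fun (p : List Int × Int) k =>
          (p.1 ++ [if PySem.Int.mod (n - k) 2 = 0 then p.2 else -p.2],
           PySem.Int.floordiv (p.2 * (n - k)) (k + 1))) ([], 1)
      (PySem.List.pyRange 0 m 1).map (fun i =>
        (PySem.List.pyRange 0 (n + 1) 1).foldl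
          (fun acc k => acc + PySem.List.pyGetD cf.1 k 0 * PySem.List.pyGetD l (i + k) 0) 0)

-- ===== PRECONDITION & SPEC =====
def Spec_itere (l : List Int) (n : Int) (out : List Int) : Prop := out = itere_alt l n
instance (l : List Int) (n : Int) (out : List Int) : Decidable (Spec_itere l n out) := by unfold Spec_itere; infer_instance

-- ===== CLAIM (what is proved, stated in full; the proofs are below) =====
def Claim_equal_itere : Prop := ∀ (l : List Int) (n : Int), Dom_itere l n → Spec_itere l n (itere l n)

-- ===== LEMMAS AND PROOFS =====

-- one difference sweep, as a map
def dstep (l : List Int) : List Int :=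
  (List.range (l.length - 1)).map (fun i => l.getD (i + 1) 0 - l.getD i 0)

-- signed binomial coefficient (-1)^(N-k) * C(N,k)
def E (N k : Nat) : Int := (-1) ^ (N - k) * (N.choose k)

-- the closed-form value B computes, stated over Nat
def altF (N : Nat) (l : List Int) : List Int :=
  (List.range (l.length - N)).map
    (fun i => ∑ k ∈ Finset.range (N + 1), E N k * l.getD (i + k) 0)

theorem dA_eq (l : List Int) : differencesA l = dstep l := by
  unfold differencesA dstep
  rw [PySem.List.pyRange_one, List.foldl_map, PySem.List.foldl_append_singleton_eq_map]
  simp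
  intro a ha
  rw [show ((a:Int)+1) = ((a+1:Nat):Int) by push_cast; ring, PySem.List.pyGetD_natCast]
  simp [List.getD]

theorem foldl_pair {α : Type} (xs : List α) (p : List Int × List Int) (h : xs ≠ []) :
    xs.foldl (fun s _ => (dstep s.2, dstep s.2)) p
      = (dstep^[xs.length] p.2, dstep^[xs.length] p.2) := by
  induction xs generalizing p with
  | nil => exact absurd rfl h
  | cons a xs ih =>
    by_cases hx : xs = []
    · subst hx; simp
    · rw [List.foldl_cons, ih _ hx]
      simp [Function.iterate_succ_apply]

theorem itere_neg (l : List Int) (n : Int) (h : n ≤ -1) : itere l n = [] := by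
  unfold itere
  rw [if_neg (by omega), if_neg (by omega), PySem.List.pyRange_one_eq_nil (by omega)]
  simp [dA_eq, dstep]

theorem itere_eq_iter (l : List Int) (n : Int) (h : 1 ≤ n) :
    itere l n = dstep^[n.toNat] l := by
  unfold itere
  rw [if_neg (by omega)]
  by_cases h1 : n = 1
  · subst h1; simp [dA_eq]
  · rw [if_neg h1]
    have hne : PySem.List.pyRange 0 (n - 1) 1 ≠ [] := by
      intro hc
      have := congrArg List.length hc
      rw [PySem.List.length_pyRange_one] at this
      simp at this
      omega
    simp only [dA_eq]
    rw [foldl_pair _ _ hne, PySem.List.length_pyRange_one]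
    have hnn : n.toNat = ((n - 1 - 0).toNat) + 1 := by omega
    rw [hnn, Function.iterate_succ_apply']


theorem sum_map_range (c : Nat) (f : Nat → Int) :
    ((List.range c).map f).sum = ∑ k ∈ Finset.range c, f k := by
  induction c with
  | zero => simp
  | succ c ih => rw [List.range_succ, List.map_append, List.sum_append, Finset.sum_range_succ, ih]; simp

theorem range_cast (b : Int) (hb : 0 ≤ b) :
    PySem.List.pyRange 0 b 1 = (List.range b.toNat).map Int.ofNat := by
  rw [PySem.List.pyRange_one]
  have : (b - 0).toNat = b.toNat := by omega
  rw [this]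
  apply List.map_congr_left
  intro a _
  simp

theorem sign_eq (N j : Nat) (hj : j ≤ N) :
    (if PySem.Int.mod ((N:Int) - (j:Int)) 2 = 0 then (N.choose j : Int) else -(N.choose j : Int))
      = E N j := by
  have hc : (N:Int) - (j:Int) = ((N - j : Nat) : Int) := by omega
  rw [hc, PySem.Int.mod_eq_emod_of_pos (by norm_num)]
  unfold E
  by_cases he : Even (N - j)
  · rw [if_pos, he.neg_one_pow, one_mul]
    rw [← Int.even_iff, Int.even_coe_nat]; exact he
  · rw [if_neg, ((Nat.even_or_odd (N - j)).resolve_left he).neg_one_pow]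
    · ring
    · rw [← Int.even_iff, Int.even_coe_nat]; exact he

theorem next_c (N j : Nat) (hj : j ≤ N) :
    PySem.Int.floordiv ((N.choose j : Int) * ((N:Int) - (j:Int))) ((j:Int) + 1)
      = (N.choose (j+1) : Int) := by
  have hc : (N:Int) - (j:Int) = ((N - j : Nat) : Int) := by omega
  have h1 : ((j:Int) + 1) = ((j + 1 : Nat) : Int) := by push_cast; ring
  rw [hc, h1, show ((N.choose j : Int) * ((N - j : Nat) : Int)) = ((N.choose j * (N - j) : Nat) : Int) by push_cast; ring]
  rw [PySem.Int.floordiv_natCast, ← Nat.choose_succ_right_eq, Nat.mul_div_cancel _ (by omega)]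

theorem coef_fold (N j : Nat) (hj : j ≤ N + 1) :
    ((List.range j).map (Int.ofNat)).foldl
      (fun (p : List Int × Int) k =>
        (p.1 ++ [if PySem.Int.mod ((N:Int) - k) 2 = 0 then p.2 else -p.2],
         PySem.Int.floordiv (p.2 * ((N:Int) - k)) (k + 1))) ([], 1)
      = ((List.range j).map (fun k => E N k), (N.choose j : Int)) := by
  induction j with
  | zero => simp
  | succ j ih =>
    rw [List.range_succ, List.map_append, List.foldl_append, ih (by omega),
        List.map_append]
    simp only [List.map_cons, List.map_nil, List.foldl_cons, List.foldl_nil]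
    rw [show Int.ofNat j = (j : Int) from rfl]
    rw [sign_eq N j (by omega), next_c N j (by omega)]

theorem alt_eq_altF (l : List Int) (n : Int) (h : 1 ≤ n) :
    itere_alt l n = altF n.toNat l := by
  obtain ⟨N, rfl⟩ : ∃ N : Nat, n = (N : Int) := ⟨n.toNat, by omega⟩
  rw [Int.toNat_natCast]
  unfold itere_alt altF
  rw [if_neg (by omega)]
  by_cases hm : (l.length : Int) - (N : Int) ≤ 0
  · rw [if_pos hm]
    have h0 : l.length - N = 0 := by omega
    simp [h0]
  · rw [if_neg hm]
    have hr : PySem.List.pyRange 0 ((N:Int) + 1) 1 = (List.range (N+1)).map Int.ofNat := by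
      rw [range_cast _ (by omega), show ((N:Int) + 1).toNat = N + 1 by omega]
    rw [hr, coef_fold N (N+1) le_rfl]
    rw [range_cast _ (by omega), show ((l.length : Int) - (N:Int)).toNat = l.length - N by omega]
    rw [List.map_map]
    apply List.map_congr_left
    intro i hi
    simp only [Function.comp_apply]
    rw [List.foldl_map]
    rw [PySem.List.foldl_add]
    rw [zero_add, sum_map_range]
    apply Finset.sum_congr rfl
    intro k hk
    have hk' : k < N + 1 := Finset.mem_range.mp hk
    rw [show (Int.ofNat i + Int.ofNat k) = ((i + k : Nat) : Int) by simp,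
        PySem.List.pyGetD_natCast]
    rw [show (Int.ofNat k) = ((k : Nat) : Int) by simp, PySem.List.pyGetD_natCast]
    rw [List.getD_eq_getElem?_getD, List.getElem?_map]
    simp [List.getElem?_range hk', List.getD]

theorem E_succ_zero (N : Nat) : E (N + 1) 0 = -E N 0 := by
  unfold E
  simp [pow_succ]

theorem E_top_succ (N : Nat) : E N (N + 1) = 0 := by
  unfold E
  simp

theorem E_succ_succ (N k : Nat) : E (N + 1) (k + 1) = E N k - E N (k + 1) := by
  unfold E
  rcases lt_trichotomy k N with hlt | rfl | hgt
  · have h1 : N + 1 - (k + 1) = (N - (k + 1)) + 1 := by omega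
    have h2 : N - k = (N - (k + 1)) + 1 := by omega
    rw [Nat.choose_succ_succ, h1, h2, pow_succ]
    push_cast
    ring
  · simp [Nat.choose_self]
  · simp [Nat.choose_eq_zero_of_lt (show N + 1 < k + 1 by omega),
      Nat.choose_eq_zero_of_lt (show N < k by omega),
      Nat.choose_eq_zero_of_lt (show N < k + 1 by omega)]

theorem sumE_succ (N : Nat) (f : Nat → Int) :
    ∑ k ∈ Finset.range (N + 2), E (N + 1) k * f k
      = ∑ k ∈ Finset.range (N + 1), E N k * (f (k + 1) - f k) := by
  have e3 : ∑ k ∈ Finset.range (N + 1), E N (k + 1) * f (k + 1)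
      = ∑ k ∈ Finset.range N, E N (k + 1) * f (k + 1) := by
    rw [Finset.sum_range_succ, E_top_succ]
    simp
  have e2 : ∑ k ∈ Finset.range (N + 1), E N k * f k
      = (∑ k ∈ Finset.range (N + 1), E N (k + 1) * f (k + 1)) + E N 0 * f 0 := by
    rw [e3, Finset.sum_range_succ']
  rw [Finset.sum_range_succ']
  simp only [E_succ_succ, E_succ_zero, sub_mul, neg_mul, mul_sub]
  rw [Finset.sum_sub_distrib, Finset.sum_sub_distrib, e2]
  ring

theorem altF_zero (l : List Int) : altF 0 l = l := by
  unfold altF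
  apply List.ext_getElem
  · simp
  · intro i h1 h2
    simp only [List.getElem_map, List.getElem_range]
    simp [E, List.getD, List.getElem?_eq_getElem h2]

theorem altF_succ (N : Nat) (l : List Int) : altF (N + 1) l = altF N (dstep l) := by
  unfold altF dstep
  rw [List.length_map, List.length_range]
  rw [show l.length - 1 - N = l.length - (N + 1) by omega]
  apply List.map_congr_left
  intro i hi
  have hi' : i < l.length - (N + 1) := List.mem_range.mp hi
  rw [show N + 1 + 1 = N + 2 from rfl, sumE_succ N (fun k => l.getD (i + k) 0)]
  apply Finset.sum_congr rfl
  intro k hk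
  have hk' : k < N + 1 := Finset.mem_range.mp hk
  have hik : i + k < l.length - 1 := by omega
  have hd : ((List.range (l.length - 1)).map (fun j => l.getD (j + 1) 0 - l.getD j 0)).getD (i + k) 0
      = l.getD (i + k + 1) 0 - l.getD (i + k) 0 := by
    rw [List.getD_eq_getElem?_getD, List.getElem?_map, List.getElem?_range hik]
    simp [List.getD]
  rw [hd, show i + (k + 1) = i + k + 1 from rfl]

theorem altF_iter (N : Nat) (l : List Int) : altF N l = dstep^[N] l := by
  induction N generalizing l with
  | zero => simpa using altF_zero l
  | succ N ih => rw [altF_succ, ih, Function.iterate_succ_apply]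

-- ===== VERDICT (by name: the statement is the Claim_ definition above) =====
theorem itere_spec : Claim_equal_itere := by
  intro l n _
  unfold Spec_itere
  rcases lt_trichotomy n 0 with h | h | h
  · rw [itere_neg l n (by omega)]
    simp [itere_alt, show n ≤ 0 by omega, show n ≠ 0 by omega]
  · subst h; simp [itere, itere_alt]
  · rw [itere_eq_iter l n (by omega), alt_eq_altF l n (by omega), altF_iter]
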